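-- pv_equiv track=rewrite | github.com/begumsudeuslu/Tetris-of-Numbers | TetrisOfNumbers.py | add_space
-- ===== SOURCE A (Python) =====
-- def is_valid(i,j, list):
--     return 0 <= i < len(list) and 0 <= j < len(list[0])
--
-- def add_space(row, col, current_number, current_list,score):
--     if current_list[row][col] == current_number:
--         current_list[row][col] = " "
--         score+= int(current_number)
--         for pos_i, pos_j in [(-1, 0), (1, 0), (0, 1), (0,-1)]:
--             contact_number_i = row +  pos_i
--             contact_number_j = col +  pos_j
--
--             if is_valid(contact_number_i, contact_number_j, current_list):
--                 current_list, score= add_space(contact_number_i, contact_number_j, current_number, current_list, score)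
--                 #This will continue for every contact numbers until not equal anymore.
--
--     return current_list, score
-- ===== SOURCE B (Python) =====
-- def add_space(row, col, current_number, current_list, score):
--     # Iterative flood fill with an explicit stack instead of A's recursion.
--     # Same mutation of current_list in place, same return value.
--     if current_list[row][col] != current_number:
--         return current_list, score
--     n = int(current_number)
--     nrows = len(current_list)
--     ncols = len(current_list[0])
--     current_list[row][col] = " "
--     score += n
--     stack = []
--     for di, dj in ((0, -1), (0, 1), (1, 0), (-1, 0)):
--         i, j = row + di, col + dj
--         if 0 <= i < nrows and 0 <= j < ncols:
--             stack.append((i, j))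
--     while stack:
--         i, j = stack.pop()
--         if current_list[i][j] == current_number:
--             current_list[i][j] = " "
--             score += n
--             for di, dj in ((0, -1), (0, 1), (1, 0), (-1, 0)):
--                 a, b = i + di, j + dj
--                 if 0 <= a < nrows and 0 <= b < ncols:
--                     stack.append((a, b))
--     return current_list, score
-- ===== Notes on version B (the rewrite author's own statement) =====
-- stated objective: alternative
-- what changed: A's recursive flood fill (one Python call frame per visited cell) is replaced by an iterative flood fill that pops (i,j) positions from an explicit stack list, with the starting cell handled once before the loop; same in-place mutation and same (list, score) result.
import Mathlib
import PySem

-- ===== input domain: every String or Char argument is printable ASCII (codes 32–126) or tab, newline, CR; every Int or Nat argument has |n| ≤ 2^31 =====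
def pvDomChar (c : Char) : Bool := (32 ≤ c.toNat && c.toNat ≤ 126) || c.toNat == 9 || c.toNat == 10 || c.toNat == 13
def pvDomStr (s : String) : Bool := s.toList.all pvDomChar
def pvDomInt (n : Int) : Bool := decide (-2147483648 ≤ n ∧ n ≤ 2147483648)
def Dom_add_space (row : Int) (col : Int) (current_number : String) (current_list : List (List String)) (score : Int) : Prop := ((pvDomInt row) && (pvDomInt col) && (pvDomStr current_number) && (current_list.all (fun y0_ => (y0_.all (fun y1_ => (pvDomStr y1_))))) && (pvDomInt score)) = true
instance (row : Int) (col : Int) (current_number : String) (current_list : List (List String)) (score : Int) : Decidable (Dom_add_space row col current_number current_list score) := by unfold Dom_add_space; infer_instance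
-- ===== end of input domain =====

-- B replaces A's recursive flood fill by an iterative flood fill over an explicit stack
-- (same traversal, same in-place mutation of current_list, same return value).


-- ===== PORT A =====
-- current_list[i][j] (Python indexing, incl. negative wrap; none = IndexError)
def pvCell (g : List (List String)) (i j : Int) : Option String :=
  (PySem.List.pyGet? g i).bind (fun r => PySem.List.pyGet? r j)

-- current_list[i][j] = " "  (in-place row update, Python indexing)
def pvBlank (g : List (List String)) (i j : Int) : List (List String) :=
  match PySem.List.pyGet? g i with
  | some r => PySem.List.pySetD g i (PySem.List.pySetD r j " ")
  | none => g

-- helper is_valid of the module (short-circuit: list[0] is only read when 0 <= i < len(list))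
def is_valid (i j : Int) (g : List (List String)) : Bool :=
  decide (0 ≤ i ∧ i < (g.length : Int) ∧ 0 ≤ j ∧ j < ((g.headD []).length : Int))

-- the neighbour-offset literal of A's for-loop
def pvDirs : List (Int × Int) := [(-1, 0), (1, 0), (0, 1), (0, -1)]

-- A's recursive flood fill; fuel (one unit per blanked cell) only makes the
-- Python recursion a total Lean function, it never changes the computed value.
mutual
def pvFillA (cn : String) (n : Int) : Nat → Int → Int → List (List String) × Int → List (List String) × Int
  | 0, _, _, st => st
  | f+1, i, j, st =>
    if pvCell st.1 i j = some cn then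
      pvFillALoop cn n f i j pvDirs (pvBlank st.1 i j, st.2 + n)
    else st
  termination_by f _ _ _ => (f, 0)
def pvFillALoop (cn : String) (n : Int) : Nat → Int → Int → List (Int × Int) → List (List String) × Int → List (List String) × Int
  | _, _, _, [], st => st
  | f, i, j, d :: ds, st =>
    pvFillALoop cn n f i j ds
      (if is_valid (i + d.1) (j + d.2) st.1 then pvFillA cn n f (i + d.1) (j + d.2) st else st)
  termination_by f _ _ ds _ => (f, ds.length + 1)
end

-- matching cells = upper bound on blanking steps (fuel budget)
def pvMC (cn : String) (g : List (List String)) : Nat := (g.map (fun r => r.count cn)).sum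

def add_space (row : Int) (col : Int) (current_number : String) (current_list : List (List String)) (score : Int) : List (List String) × Int :=
  pvFillA current_number ((PySem.Int.ofStr? current_number).getD 0)
    (pvMC current_number current_list + 1) row col (current_list, score)

-- ===== PORT B =====
-- push the valid neighbours (B iterates the reversed direction list; stack top = list head)
def pvPush (nrows ncols : Int) (i j : Int) (stk : List (Int × Int)) : List (Int × Int) :=
  ([((0:Int), (-1:Int)), (0, 1), (1, 0), (-1, 0)]).foldl
    (fun s d => if 0 ≤ i + d.1 ∧ i + d.1 < nrows ∧ 0 ≤ j + d.2 ∧ j + d.2 < ncols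
                then (i + d.1, j + d.2) :: s else s) stk

-- B's while-loop over the explicit stack (same fuel device as in port A)
def pvFillB (cn : String) (n : Int) (nrows ncols : Int) : Nat → List (Int × Int) → List (List String) × Int → List (List String) × Int
  | 0, _, st => st
  | _+1, [], st => st
  | f+1, (i, j) :: stk, st =>
    if pvCell st.1 i j = some cn then
      pvFillB cn n nrows ncols f (pvPush nrows ncols i j stk) (pvBlank st.1 i j, st.2 + n)
    else pvFillB cn n nrows ncols (f+1) stk st
termination_by f stk _ => (f, stk.length)

def add_space_alt (row : Int) (col : Int) (current_number : String) (current_list : List (List String)) (score : Int) : List (List String) × Int :=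
  match pvCell current_list row col with
  | none => (current_list, score)      -- Python raises IndexError here (excluded by Pre_)
  | some c =>
    if c = current_number then
      let n := (PySem.Int.ofStr? current_number).getD 0   -- int(current_number); Pre_ guarantees the parse
      let nrows := (current_list.length : Int)
      let ncols := ((current_list.headD []).length : Int)
      pvFillB current_number n nrows ncols (pvMC current_number current_list + 1)
        (pvPush nrows ncols row col []) (pvBlank current_list row col, score + n)
    else (current_list, score)

-- ===== PRECONDITION & SPEC =====
-- Pre_ excludes exactly the inputs where the Python can raise: a start index outside the
-- grid (IndexError), a matching start with a current_number int() cannot parse (ValueError),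
-- and — conservatively — a matching start in a ragged grid whose rows can be shorter than
-- row 0 (the flood fill may then index past a short row: IndexError).
def Pre_add_space (row : Int) (col : Int) (current_number : String) (current_list : List (List String)) (score : Int) : Prop :=
  (pvCell current_list row col).isSome = true ∧
  (pvCell current_list row col = some current_number →
    (PySem.Int.ofStr? current_number).isSome = true ∧
    ∀ r ∈ current_list, (current_list.headD []).length ≤ r.length)
instance (row : Int) (col : Int) (current_number : String) (current_list : List (List String)) (score : Int) : Decidable (Pre_add_space row col current_number current_list score) := by unfold Pre_add_space; infer_instance

def pvWitness_add_space : Int × Int × String × List (List String) × Int :=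
  (0, 0, "1", [["1", "2"], ["1", "1"]], 0)

def Spec_add_space (row : Int) (col : Int) (current_number : String) (current_list : List (List String)) (score : Int) (out : List (List String) × Int) : Prop := out = add_space_alt row col current_number current_list score
instance (row : Int) (col : Int) (current_number : String) (current_list : List (List String)) (score : Int) (out : List (List String) × Int) : Decidable (Spec_add_space row col current_number current_list score out) := by unfold Spec_add_space; infer_instance

-- ===== CLAIM (what is proved, stated in full; the proofs are below) =====
def Claim_equal_add_space : Prop := ∀ (row : Int) (col : Int) (current_number : String) (current_list : List (List String)) (score : Int), Dom_add_space row col current_number current_list score → Pre_add_space row col current_number current_list score → Spec_add_space row col current_number current_list score (add_space row col current_number current_list score)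

-- ===== LEMMAS AND PROOFS =====

theorem add_space_witness_ok :
    Dom_add_space pvWitness_add_space.1 pvWitness_add_space.2.1 pvWitness_add_space.2.2.1 pvWitness_add_space.2.2.2.1 pvWitness_add_space.2.2.2.2 ∧
    Pre_add_space pvWitness_add_space.1 pvWitness_add_space.2.1 pvWitness_add_space.2.2.1 pvWitness_add_space.2.2.2.1 pvWitness_add_space.2.2.2.2 := by
  constructor <;> decide


-- grids seen through their row lengths (is_valid only reads these)
def pvShape (g : List (List String)) : List Nat := g.map List.length

theorem pvShape_headD (g : List (List String)) : (g.headD []).length = (pvShape g).headD 0 := by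
  cases g <;> simp [pvShape]

-- anatomy of a successful cell access, and what blanking it does
theorem cell_elim {g : List (List String)} {i j : Int} {c : String}
    (h : pvCell g i j = some c) :
    ∃ k r m, k < g.length ∧ g[k]? = some r ∧ m < r.length ∧ r[m]? = some c ∧
      pvBlank g i j = g.set k (r.set m " ") := by
  cases hk : PySem.List.pyIdx? g.length i with
  | none => simp [pvCell, PySem.List.pyGet?, hk] at h
  | some k =>
    cases hr : g[k]? with
    | none => simp [pvCell, PySem.List.pyGet?, hk, hr] at h
    | some r =>
      have hklt : k < g.length := (List.getElem?_eq_some_iff.mp hr).1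
      cases hm : PySem.List.pyIdx? r.length j with
      | none => simp [pvCell, PySem.List.pyGet?, hk, hr, hm] at h
      | some m =>
        cases hc : r[m]? with
        | none => simp [pvCell, PySem.List.pyGet?, hk, hr, hm, hc] at h
        | some c' =>
          have hmlt : m < r.length := (List.getElem?_eq_some_iff.mp hc).1
          have hcc : c' = c := by
            simpa [pvCell, PySem.List.pyGet?, hk, hr, hm, hc] using h
          have hget : PySem.List.pyGet? g i = some r := by
            simp [PySem.List.pyGet?, hk, hr]
          refine ⟨k, r, m, hklt, hr, hmlt, hcc ▸ hc, ?_⟩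
          simp [pvBlank, hget, PySem.List.pySetD, PySem.List.pySet?, hk, hm]

theorem pyIdx_lt {n : Nat} {i : Int} {k : Nat} (h : PySem.List.pyIdx? n i = some k) : k < n := by
  simp only [PySem.List.pyIdx?] at h
  split at h <;> split at h <;> simp_all <;> omega

theorem shape_blank (g : List (List String)) (i j : Int) :
    pvShape (pvBlank g i j) = pvShape g := by
  by_cases h : ∃ c, pvCell g i j = some c
  · obtain ⟨c, hc⟩ := h
    obtain ⟨k, r, m, hk, hr, hm, _, hb⟩ := cell_elim hc
    rw [hb]
    simp only [pvShape, List.map_set, List.length_set]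
    have hk2 : k < (List.map List.length g).length := by simpa using hk
    have h1 : (List.map List.length g)[k]'hk2 = r.length := by
      simpa using congrArg List.length (List.getElem?_eq_some_iff.mp hr).2
    rw [← h1, List.set_getElem_self]
  · cases hg : PySem.List.pyGet? g i with
    | none => simp [pvBlank, hg]
    | some r =>
      cases hj : PySem.List.pyGet? r j with
      | none =>
        have hid : PySem.List.pySetD r j " " = r := by
          cases hmj : PySem.List.pyIdx? r.length j with
          | none => simp [PySem.List.pySetD, PySem.List.pySet?, hmj]
          | some m =>
            exfalso
            have hmlt := pyIdx_lt hmj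
            simp [PySem.List.pyGet?, hmj, List.getElem?_eq_getElem hmlt] at hj
        have hb : pvBlank g i j = PySem.List.pySetD g i (PySem.List.pySetD r j " ") := by
          simp [pvBlank, hg]
        rw [hb, hid]
        cases hki : PySem.List.pyIdx? g.length i with
        | none => simp [PySem.List.pySetD, PySem.List.pySet?, hki]
        | some k =>
          have hgk : g[k]? = some r := by simpa [PySem.List.pyGet?, hki] using hg
          obtain ⟨hklt, hkr⟩ := List.getElem?_eq_some_iff.mp hgk
          simp only [PySem.List.pySetD, PySem.List.pySet?, hki, Option.map_some,
            Option.getD_some]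
          rw [← hkr, List.set_getElem_self]
      | some c => exact absurd ⟨c, by simp [pvCell, hg, hj]⟩ h

theorem sum_map_set {α : Type} (f : α → Nat) (g : List α) (k : Nat) (x : α) (h : k < g.length) :
    ((g.set k x).map f).sum + f g[k] = (g.map f).sum + f x := by
  induction g generalizing k with
  | nil => simp at h
  | cons a g ih =>
    cases k with
    | zero => simp [List.set_cons_zero]; omega
    | succ k =>
      have hk : k < g.length := by simpa using h
      have := ih k hk
      simp only [List.set_cons_succ, List.map_cons, List.sum_cons, List.getElem_cons_succ]
      omega

theorem cell_mc_pos {cn : String} {g : List (List String)} {i j : Int}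
    (h : pvCell g i j = some cn) : 1 ≤ pvMC cn g := by
  obtain ⟨k, r, m, hk, hr, hm, hc, _⟩ := cell_elim h
  have hmem : cn ∈ r := List.mem_of_getElem? hc
  have h1 : 1 ≤ r.count cn := List.count_pos_iff.mpr hmem
  have hmem2 : r.count cn ∈ g.map (fun r => r.count cn) :=
    List.mem_map.mpr ⟨r, List.mem_of_getElem? hr, rfl⟩
  have := List.single_le_sum (l := g.map (fun r => r.count cn)) (fun x _ => Nat.zero_le x) _ hmem2
  unfold pvMC; omega

theorem mc_blank {cn : String} (hcn : cn ≠ " ") {g : List (List String)} {i j : Int}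
    (h : pvCell g i j = some cn) : pvMC cn (pvBlank g i j) + 1 = pvMC cn g := by
  obtain ⟨k, r, m, hk, hr, hm, hc, hb⟩ := cell_elim h
  have hrm : r[m] = cn := (List.getElem?_eq_some_iff.mp hc).2
  have hcount : (r.set m " ").count cn + 1 = r.count cn := by
    have hcs := List.count_set (l := r) (i := m) (a := " ") (b := cn) hm
    have hbe : (r[m] == cn) = true := by simp [hrm]
    have hne : (" " == cn) = false := by simpa using (Ne.symm hcn)
    have hpos : 1 ≤ r.count cn := List.count_pos_iff.mpr (List.mem_of_getElem? hc)
    rw [hbe, hne] at hcs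
    simp at hcs
    omega
  have hsum := sum_map_set (fun r => r.count cn) g k (r.set m " ") hk
  have hgk : g[k].count cn = r.count cn := by
    rw [(List.getElem?_eq_some_iff.mp hr).2]
  rw [hb]; unfold pvMC at *
  omega

-- shape preservation and match-count monotonicity for A's recursion
theorem fillA_all (cn : String) (n : Int) (hcn : cn ≠ " ") : ∀ f : Nat,
    (∀ i j st, pvShape (pvFillA cn n f i j st).1 = pvShape st.1 ∧
       pvMC cn (pvFillA cn n f i j st).1 ≤ pvMC cn st.1) ∧
    (∀ i j ds st, pvShape (pvFillALoop cn n f i j ds st).1 = pvShape st.1 ∧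
       pvMC cn (pvFillALoop cn n f i j ds st).1 ≤ pvMC cn st.1) := by
  intro f
  induction f with
  | zero =>
    constructor
    · intro i j st; simp [pvFillA]
    · intro i j ds
      induction ds with
      | nil => intro st; simp [pvFillALoop]
      | cons d ds ih =>
        intro st
        have hz : (if is_valid (i + d.1) (j + d.2) st.1 then pvFillA cn n 0 (i + d.1) (j + d.2) st else st) = st := by
          split <;> simp [pvFillA]
        simp only [pvFillALoop, hz]
        exact ih st
  | succ f ih =>
    have hA : ∀ i j st, pvShape (pvFillA cn n (f+1) i j st).1 = pvShape st.1 ∧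
        pvMC cn (pvFillA cn n (f+1) i j st).1 ≤ pvMC cn st.1 := by
      intro i j st
      by_cases h : pvCell st.1 i j = some cn
      · have hb := ih.2 i j pvDirs (pvBlank st.1 i j, st.2 + n)
        have hs := shape_blank st.1 i j
        have hm := mc_blank hcn h
        have hbb : pvMC cn (pvBlank st.1 i j, st.2 + n).1 = pvMC cn (pvBlank st.1 i j) := rfl
        simp only [pvFillA, h, if_pos]
        constructor
        · exact hb.1.trans hs
        · omega
      · simp [pvFillA, h]
    refine ⟨hA, ?_⟩
    intro i j ds
    induction ds with
    | nil => intro st; simp [pvFillALoop]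
    | cons d ds ihds =>
      intro st
      set t := if is_valid (i + d.1) (j + d.2) st.1 then pvFillA cn n (f+1) (i + d.1) (j + d.2) st else st with ht
      have hts : pvShape t.1 = pvShape st.1 ∧ pvMC cn t.1 ≤ pvMC cn st.1 := by
        rw [ht]; split
        · exact hA _ _ st
        · exact ⟨rfl, le_refl _⟩
      have := ihds t
      simp only [pvFillALoop, ← ht]
      constructor
      · exact this.1.trans hts.1
      · omega

-- fuel does not matter once it covers the number of matching cells (A's recursion)
theorem fillA_stab (cn : String) (n : Int) (hcn : cn ≠ " ") : ∀ N : Nat, ∀ f1 f2 : Nat, f1 + f2 ≤ N →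
    (∀ i j st, pvMC cn st.1 ≤ f1 → pvMC cn st.1 ≤ f2 →
       pvFillA cn n f1 i j st = pvFillA cn n f2 i j st) ∧
    (∀ i j ds st, pvMC cn st.1 ≤ f1 → pvMC cn st.1 ≤ f2 →
       pvFillALoop cn n f1 i j ds st = pvFillALoop cn n f2 i j ds st) := by
  intro N
  induction N with
  | zero =>
    intro f1 f2 hN
    obtain ⟨rfl, rfl⟩ : f1 = 0 ∧ f2 = 0 := by omega
    exact ⟨fun _ _ _ _ _ => rfl, fun _ _ _ _ _ _ => rfl⟩
  | succ N ihN =>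
    intro f1 f2 hN
    have hA : ∀ i j st, pvMC cn st.1 ≤ f1 → pvMC cn st.1 ≤ f2 →
        pvFillA cn n f1 i j st = pvFillA cn n f2 i j st := by
      intro i j st h1 h2
      by_cases hc : pvCell st.1 i j = some cn
      · have hpos := cell_mc_pos hc
        obtain ⟨f1', rfl⟩ : ∃ k, f1 = k + 1 := ⟨f1 - 1, by omega⟩
        obtain ⟨f2', rfl⟩ : ∃ k, f2 = k + 1 := ⟨f2 - 1, by omega⟩
        simp only [pvFillA, hc, if_pos]
        have hmb := mc_blank hcn hc
        exact (ihN f1' f2' (by omega)).2 i j pvDirs (pvBlank st.1 i j, st.2 + n)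
          (by simp; omega) (by simp; omega)
      · have e1 : pvFillA cn n f1 i j st = st := by cases f1 <;> simp [pvFillA, hc]
        have e2 : pvFillA cn n f2 i j st = st := by cases f2 <;> simp [pvFillA, hc]
        rw [e1, e2]
    refine ⟨hA, ?_⟩
    intro i j ds
    induction ds with
    | nil => intro st _ _; simp [pvFillALoop]
    | cons d ds ihds =>
      intro st h1 h2
      have et : (if is_valid (i + d.1) (j + d.2) st.1 then pvFillA cn n f1 (i + d.1) (j + d.2) st else st)
          = (if is_valid (i + d.1) (j + d.2) st.1 then pvFillA cn n f2 (i + d.1) (j + d.2) st else st) := by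
        split
        · exact hA _ _ st h1 h2
        · rfl
      simp only [pvFillALoop]
      rw [et]
      set t := if is_valid (i + d.1) (j + d.2) st.1 then pvFillA cn n f2 (i + d.1) (j + d.2) st else st with ht
      have htm : pvMC cn t.1 ≤ pvMC cn st.1 := by
        rw [ht]; split
        · exact ((fillA_all cn n hcn f2).1 _ _ st).2
        · exact le_refl _
      exact ihds t (by omega) (by omega)

-- the per-seed fold that replays A's recursion over a list of start cells
def pvRun (cn : String) (n : Int) (f : Nat) (st : List (List String) × Int)
    (ps : List (Int × Int)) : List (List String) × Int :=
  ps.foldl (fun t p => pvFillA cn n f p.1 p.2 t) st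

theorem run_all (cn : String) (n : Int) (hcn : cn ≠ " ") (f : Nat) :
    ∀ ps st, pvShape (pvRun cn n f st ps).1 = pvShape st.1 ∧
      pvMC cn (pvRun cn n f st ps).1 ≤ pvMC cn st.1 := by
  intro ps
  induction ps with
  | nil => intro st; simp [pvRun]
  | cons p ps ih =>
    intro st
    have h1 := (fillA_all cn n hcn f).1 p.1 p.2 st
    have h2 := ih (pvFillA cn n f p.1 p.2 st)
    simp only [pvRun, List.foldl_cons] at *
    exact ⟨h2.1.trans h1.1, le_trans h2.2 h1.2⟩

theorem run_stab (cn : String) (n : Int) (hcn : cn ≠ " ") :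
    ∀ ps st f1 f2, pvMC cn st.1 ≤ f1 → pvMC cn st.1 ≤ f2 →
      pvRun cn n f1 st ps = pvRun cn n f2 st ps := by
  intro ps
  induction ps with
  | nil => intro st f1 f2 _ _; rfl
  | cons p ps ih =>
    intro st f1 f2 h1 h2
    have hstep := (fillA_stab cn n hcn (f1 + f2) f1 f2 le_rfl).1 p.1 p.2 st h1 h2
    have hmono := ((fillA_all cn n hcn f2).1 p.1 p.2 st).2
    simp only [pvRun, List.foldl_cons]
    rw [hstep]
    exact ih _ f1 f2 (by omega) (by omega)

-- valid neighbours of (i,j), in the order A's loop visits them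
def pvNbrs (nrows ncols i j : Int) : List (Int × Int) :=
  pvDirs.filterMap (fun d =>
    if 0 ≤ i + d.1 ∧ i + d.1 < nrows ∧ 0 ≤ j + d.2 ∧ j + d.2 < ncols
    then some (i + d.1, j + d.2) else none)

theorem isvalid_dim {g : List (List String)} {nrows ncols : Int}
    (hR : (g.length : Int) = nrows) (hC : ((g.headD []).length : Int) = ncols) (a b : Int) :
    is_valid a b g = decide (0 ≤ a ∧ a < nrows ∧ 0 ≤ b ∧ b < ncols) := by
  simp only [is_valid, hR.symm, hC.symm]

-- A's inner for-loop is the fold of A's recursion over the valid neighbours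
theorem loop_eq_run (cn : String) (n : Int) (hcn : cn ≠ " ") (f : Nat) (nrows ncols : Int)
    (i j : Int) :
    ∀ ds st, (st.1.length : Int) = nrows → ((st.1.headD []).length : Int) = ncols →
    pvFillALoop cn n f i j ds st =
      pvRun cn n f st (ds.filterMap (fun d =>
        if 0 ≤ i + d.1 ∧ i + d.1 < nrows ∧ 0 ≤ j + d.2 ∧ j + d.2 < ncols
        then some (i + d.1, j + d.2) else none)) := by
  intro ds
  induction ds with
  | nil => intro st _ _; simp [pvFillALoop, pvRun]
  | cons d ds ih =>
    intro st hR hC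
    have hv := isvalid_dim hR hC (i + d.1) (j + d.2)
    by_cases hd : 0 ≤ i + d.1 ∧ i + d.1 < nrows ∧ 0 ≤ j + d.2 ∧ j + d.2 < ncols
    · have hvt : is_valid (i + d.1) (j + d.2) st.1 = true := by rw [hv]; simpa using hd
      have hsh := ((fillA_all cn n hcn f).1 (i + d.1) (j + d.2) st).1
      have hlen : (pvFillA cn n f (i + d.1) (j + d.2) st).1.length = st.1.length := by
        simpa [pvShape] using congrArg List.length hsh
      have hhd : ((pvFillA cn n f (i + d.1) (j + d.2) st).1.headD []).length = (st.1.headD []).length := by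
        rw [pvShape_headD, pvShape_headD, hsh]
      have hR' : ((pvFillA cn n f (i + d.1) (j + d.2) st).1.length : Int) = nrows := by
        rw [hlen]; exact hR
      have hC' : (((pvFillA cn n f (i + d.1) (j + d.2) st).1.headD []).length : Int) = ncols := by
        rw [hhd]; exact hC
      simp only [pvFillALoop, hvt, if_pos, List.filterMap_cons, hd]
      rw [ih _ hR' hC']
      simp [pvRun]
    · have hvf : is_valid (i + d.1) (j + d.2) st.1 = false := by
        rw [hv]; simpa using hd
      simp only [pvFillALoop, hvf, Bool.false_eq_true, if_false]
      rw [ih st hR hC]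
      simp [hd]

-- B's neighbour pushes put exactly the valid neighbours, in A's order, on top of the stack
theorem push_eq (nrows ncols i j : Int) (stk : List (Int × Int)) :
    pvPush nrows ncols i j stk = pvNbrs nrows ncols i j ++ stk := by
  unfold pvPush pvNbrs pvDirs
  simp only [List.foldl_cons, List.foldl_nil, List.filterMap_cons, List.filterMap_nil]
  split_ifs <;> rfl

-- B's loop is inert when no matching cell is left
theorem fillB_mc0 (cn : String) (n : Int) (nrows ncols : Int) {st : List (List String) × Int}
    (h : pvMC cn st.1 = 0) : ∀ stk f, pvFillB cn n nrows ncols f stk st = st := by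
  intro stk
  induction stk with
  | nil => intro f; cases f <;> simp [pvFillB]
  | cons p stk ih =>
    intro f
    cases f with
    | zero => simp [pvFillB]
    | succ f =>
      obtain ⟨i, j⟩ := p
      have hnc : ¬ pvCell st.1 i j = some cn := fun hc => by
        have := cell_mc_pos hc; omega
      simp only [pvFillB, hnc, if_false]
      exact ih (f + 1)

-- fuel does not matter once it covers the number of matching cells (B's loop)
theorem fillB_stab (cn : String) (n : Int) (nrows ncols : Int) (hcn : cn ≠ " ") :
    ∀ N : Nat, ∀ f1 f2 : Nat, f1 + f2 ≤ N →
    ∀ stk st, pvMC cn st.1 ≤ f1 → pvMC cn st.1 ≤ f2 →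
      pvFillB cn n nrows ncols f1 stk st = pvFillB cn n nrows ncols f2 stk st := by
  intro N
  induction N with
  | zero =>
    intro f1 f2 hN
    obtain ⟨rfl, rfl⟩ : f1 = 0 ∧ f2 = 0 := by omega
    exact fun _ _ _ _ => rfl
  | succ N ihN =>
    intro f1 f2 hN stk
    induction stk with
    | nil => intro st _ _; cases f1 <;> cases f2 <;> simp [pvFillB]
    | cons p stk ihs =>
      intro st h1 h2
      obtain ⟨i, j⟩ := p
      rcases Nat.eq_zero_or_pos f1 with rfl | hf1
      · have h0 : pvMC cn st.1 = 0 := by omega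
        rw [fillB_mc0 cn n nrows ncols h0 ((i, j) :: stk) 0,
          fillB_mc0 cn n nrows ncols h0 ((i, j) :: stk) f2]
      rcases Nat.eq_zero_or_pos f2 with rfl | hf2
      · have h0 : pvMC cn st.1 = 0 := by omega
        rw [fillB_mc0 cn n nrows ncols h0 ((i, j) :: stk) f1,
          fillB_mc0 cn n nrows ncols h0 ((i, j) :: stk) 0]
      obtain ⟨f1', rfl⟩ : ∃ k, f1 = k + 1 := ⟨f1 - 1, by omega⟩
      obtain ⟨f2', rfl⟩ : ∃ k, f2 = k + 1 := ⟨f2 - 1, by omega⟩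
      by_cases hc : pvCell st.1 i j = some cn
      · have hm := mc_blank hcn hc
        simp only [pvFillB, hc, if_pos]
        exact ihN f1' f2' (by omega) (pvPush nrows ncols i j stk)
          (pvBlank st.1 i j, st.2 + n) (by simp; omega) (by simp; omega)
      · simp only [pvFillB, hc, if_false]
        exact ihs st h1 h2

-- THE SIMULATION: processing the seeds on top of B's stack is folding A's recursion over them
theorem sim (cn : String) (n : Int) (hcn : cn ≠ " ") (nrows ncols : Int) :
    ∀ N : Nat, ∀ f : Nat, f ≤ N → ∀ seeds stk st,
      pvMC cn st.1 < f → (st.1.length : Int) = nrows → ((st.1.headD []).length : Int) = ncols →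
      pvFillB cn n nrows ncols f (seeds ++ stk) st =
        pvFillB cn n nrows ncols f stk (pvRun cn n f st seeds) := by
  intro N
  induction N with
  | zero => intro f hf seeds stk st hmc _ _; omega
  | succ N ihN =>
    intro f hf seeds
    induction seeds with
    | nil => intro stk st _ _ _; simp [pvRun]
    | cons p seeds ihs =>
      intro stk st hmc hR hC
      obtain ⟨i, j⟩ := p
      obtain ⟨f', rfl⟩ : ∃ k, f = k + 1 := ⟨f - 1, by omega⟩
      by_cases hc : pvCell st.1 i j = some cn
      · -- the popped cell matches: blank it and push its valid neighbours
        have hm := mc_blank hcn hc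
        have hpos := cell_mc_pos hc
        set st' : List (List String) × Int := (pvBlank st.1 i j, st.2 + n) with hst'
        have hmc' : pvMC cn st'.1 = pvMC cn st.1 - 1 := by simp [hst']; omega
        have hsb := shape_blank st.1 i j
        have hR' : (st'.1.length : Int) = nrows := by
          rw [hst']
          have : (pvBlank st.1 i j).length = st.1.length := by
            simpa [pvShape] using congrArg List.length hsb
          simp only [this]; exact hR
        have hC' : ((st'.1.headD []).length : Int) = ncols := by
          rw [hst']
          have : ((pvBlank st.1 i j).headD []).length = (st.1.headD []).length := by
            rw [pvShape_headD, pvShape_headD, hsb]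
          simp only [this]; exact hC
        -- unfold one step of B
        have hB : pvFillB cn n nrows ncols (f' + 1) (((i, j) :: seeds) ++ stk) st =
            pvFillB cn n nrows ncols f' ((pvNbrs nrows ncols i j ++ seeds) ++ stk) st' := by
          simp only [List.cons_append, pvFillB, hc, if_pos, push_eq, List.append_assoc]
          rw [hst']
        -- unfold one step of A
        have hA : pvFillA cn n (f' + 1) i j st = pvRun cn n f' st' (pvNbrs nrows ncols i j) := by
          simp only [pvFillA, hc, if_pos, ← hst']
          rw [loop_eq_run cn n hcn f' nrows ncols i j pvDirs st' hR' hC']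
          rfl
        rw [hB]
        rw [ihN f' (by omega) (pvNbrs nrows ncols i j ++ seeds) stk st' (by omega) hR' hC']
        have hrunsplit : pvRun cn n f' st' (pvNbrs nrows ncols i j ++ seeds) =
            pvRun cn n f' (pvRun cn n f' st' (pvNbrs nrows ncols i j)) seeds := by
          simp [pvRun, List.foldl_append]
        rw [hrunsplit]
        set X := pvRun cn n f' st' (pvNbrs nrows ncols i j) with hX
        have hmcX : pvMC cn X.1 ≤ pvMC cn st'.1 := (run_all cn n hcn f' _ st').2
        have hrs : pvRun cn n f' X seeds = pvRun cn n (f' + 1) X seeds :=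
          run_stab cn n hcn seeds X f' (f' + 1) (by omega) (by omega)
        have hbs : pvFillB cn n nrows ncols f' stk (pvRun cn n f' X seeds) =
            pvFillB cn n nrows ncols (f' + 1) stk (pvRun cn n f' X seeds) :=
          fillB_stab cn n nrows ncols hcn (f' + (f' + 1)) f' (f' + 1) le_rfl stk _
            (by have := (run_all cn n hcn f' seeds X).2; omega)
            (by have := (run_all cn n hcn f' seeds X).2; omega)
        rw [hbs, hrs]
        have hrunA : pvRun cn n (f' + 1) st ((i, j) :: seeds) =
            pvRun cn n (f' + 1) X seeds := by
          simp only [pvRun, List.foldl_cons]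
          have : pvFillA cn n (f' + 1) i j st = X := by rw [hA, hX]
          rw [this]
        rw [hrunA]
      · -- the popped cell does not match: both sides skip it
        have hB : pvFillB cn n nrows ncols (f' + 1) (((i, j) :: seeds) ++ stk) st =
            pvFillB cn n nrows ncols (f' + 1) (seeds ++ stk) st := by
          simp only [List.cons_append, pvFillB, hc, if_false]
        have hA : pvFillA cn n (f' + 1) i j st = st := by simp [pvFillA, hc]
        rw [hB, ihs stk st hmc hR hC]
        simp only [pvRun, List.foldl_cons, hA]

-- B's loop on an empty stack returns the state
theorem fillB_nil (cn : String) (n : Int) (nrows ncols : Int) (f : Nat)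
    (st : List (List String) × Int) : pvFillB cn n nrows ncols f [] st = st := by
  cases f <;> simp [pvFillB]

-- ===== VERDICT (by name: the statement is the Claim_ definition above) =====
theorem add_space_spec : Claim_equal_add_space := by
  intro row col cn g s _ hpre
  obtain ⟨hsome, himp⟩ := hpre
  obtain ⟨c, hcell⟩ := Option.isSome_iff_exists.mp hsome
  unfold Spec_add_space add_space add_space_alt
  by_cases hcn : c = cn
  · subst hcn
    obtain ⟨hparse, -⟩ := himp hcell
    have hcnne : c ≠ " " := fun h => absurd hparse (by rw [h]; decide)
    simp only [hcell, if_pos]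
    set n := (PySem.Int.ofStr? c).getD 0 with hn
    set nrows := (g.length : Int) with hnr
    set ncols := ((g.headD []).length : Int) with hncl
    set st' : List (List String) × Int := (pvBlank g row col, s + n) with hst'
    have hsb := shape_blank g row col
    have hR' : (st'.1.length : Int) = nrows := by
      rw [hst']
      have h1 : (pvBlank g row col).length = g.length := by
        simpa [pvShape] using congrArg List.length hsb
      simp only [h1]
      rw [hnr]
    have hC' : ((st'.1.headD []).length : Int) = ncols := by
      rw [hst']
      have h1 : ((pvBlank g row col).headD []).length = (g.headD []).length := by
        rw [pvShape_headD, pvShape_headD, hsb]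
      simp only [h1]
      rw [hncl]
    have hmb := mc_blank hcnne hcell
    have hpos := cell_mc_pos hcell
    have hmcs : pvMC c st'.1 + 1 = pvMC c g := by rw [hst']; exact hmb
    have hA : pvFillA c n (pvMC c g + 1) row col (g, s) =
        pvRun c n (pvMC c g) st' (pvNbrs nrows ncols row col) := by
      have hc1 : pvCell (g, s).1 row col = some c := hcell
      simp only [pvFillA, hc1, if_pos]
      rw [show (pvBlank (g, s).1 row col, (g, s).2 + n) = st' from rfl]
      rw [loop_eq_run c n hcnne (pvMC c g) nrows ncols row col pvDirs st' hR' hC']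
      rfl
    have hBstep : pvFillB c n nrows ncols (pvMC c g + 1) (pvPush nrows ncols row col []) st'
        = pvRun c n (pvMC c g + 1) st' (pvNbrs nrows ncols row col) := by
      rw [push_eq, List.append_nil,
        show pvNbrs nrows ncols row col = pvNbrs nrows ncols row col ++ [] by simp,
        sim c n hcnne nrows ncols (pvMC c g + 1) (pvMC c g + 1) le_rfl
          (pvNbrs nrows ncols row col) [] st' (by omega) hR' hC']
      rw [fillB_nil, List.append_nil]
    rw [hA, hBstep]
    exact run_stab c n hcnne (pvNbrs nrows ncols row col) st' (pvMC c g) (pvMC c g + 1)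
      (by omega) (by omega)
  · -- starting cell does not match: both programs return the input unchanged
    have hc1 : ¬ pvCell (g, s).1 row col = some cn := by
      rw [hcell]; simpa using hcn
    simp only [hcell, if_neg hcn]
    have : pvFillA cn ((PySem.Int.ofStr? cn).getD 0) (pvMC cn g + 1) row col (g, s) = (g, s) := by
      simp [pvFillA, hc1]
    rw [this]
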